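-- pv_equiv track=rewrite | github.com/marco-olea/daily-coding-problem | problems/python/longest_palindromic_substring.py | get_all_substrings
-- ===== SOURCE A (Python) =====
-- from typing import List
--
-- def get_all_substrings(string: str) -> List[str]:
-- 	if len(string) == 0:
-- 		return []
-- 	# Start with substrings of length 1, then form all possible contiguous substrings of length 2,
-- 	# then form all possible contiguous substrings of length 3, and so on.
-- 	substrings = [[(string[i], i) for i in range(len(string))]]
-- 	while len(substrings[-1][0][0]) < len(string):
-- 		substrings += [[
-- 			(pair[0] + string[1 + pair[1]], 1 + pair[1])
-- 			for pair in substrings[-1]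
-- 			if 1 + pair[1] < len(string)]]
-- 	return [pair[0] for sublist in substrings for pair in sublist]
-- ===== SOURCE B (Python) =====
-- def get_all_substrings(string):
--     n = len(string)
--     return [string[i:i + length] for length in range(1, n + 1) for i in range(n - length + 1)]
-- ===== Notes on version B (the rewrite author's own statement) =====
-- stated objective: simpler
-- what changed: B drops A's layered table of (substring, end-index) pairs built by appending one character to the previous layer, and instead emits each substring independently by slicing in a double loop over length then start.
import Mathlib
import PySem

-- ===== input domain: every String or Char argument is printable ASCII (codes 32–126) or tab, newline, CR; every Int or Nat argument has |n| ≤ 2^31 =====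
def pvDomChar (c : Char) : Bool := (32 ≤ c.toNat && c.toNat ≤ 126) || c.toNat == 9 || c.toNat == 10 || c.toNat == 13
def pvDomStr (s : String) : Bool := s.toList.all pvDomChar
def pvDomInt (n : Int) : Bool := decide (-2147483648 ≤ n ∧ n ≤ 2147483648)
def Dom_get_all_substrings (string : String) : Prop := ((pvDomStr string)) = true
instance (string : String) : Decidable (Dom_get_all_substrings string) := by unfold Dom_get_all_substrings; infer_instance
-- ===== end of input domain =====

-- B drops A's layered table of (substring, end-index) pairs built by incremental appends
-- and instead emits each substring independently by slicing, looping over length then start (simpler).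

-- ===== PORT A =====
-- A's while loop, fueled by the (sufficient) bound cs.length: each pass appends one more
-- layer built from the previous one, exactly as the Python comprehension does.
def getAllSubstringsLayers (cs : List Char) (fuel : Nat)
    (layer : List (List Char × Nat)) : List (List (List Char × Nat)) :=
  match fuel with
  | 0 => [layer]
  | fuel + 1 =>
    if ((layer.headD ([], 0)).1).length < cs.length then
      layer :: getAllSubstringsLayers cs fuel
        (layer.filterMap (fun p =>
          if p.2 + 1 < cs.length then some (p.1 ++ [cs.getD (p.2 + 1) ' '], p.2 + 1) else none))
    else [layer]

def get_all_substrings (string : String) : List String :=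
  let cs := string.toList
  if cs.length = 0 then []
  else
    let layer0 := (List.range cs.length).map (fun i => ([cs.getD i ' '], i))
    let layers := getAllSubstringsLayers cs cs.length layer0
    (layers.flatMap id).map (fun p => String.ofList p.1)

-- ===== PORT B =====
-- s[i:i+L] on in-range natural bounds is (drop i).take L (PySem.List.slice_natCast_add).
def get_all_substrings_alt (string : String) : List String :=
  let cs := string.toList
  (List.range cs.length).flatMap (fun lm1 =>
    (List.range (cs.length - lm1)).map (fun i => String.ofList ((cs.drop i).take (lm1 + 1))))

-- ===== PRECONDITION & SPEC =====
def Spec_get_all_substrings (string : String) (out : List String) : Prop := out = get_all_substrings_alt string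
instance (string : String) (out : List String) : Decidable (Spec_get_all_substrings string out) := by unfold Spec_get_all_substrings; infer_instance

-- ===== CLAIM (what is proved, stated in full; the proofs are below) =====
def Claim_equal_get_all_substrings : Prop := ∀ (string : String), Dom_get_all_substrings string → Spec_get_all_substrings string (get_all_substrings string)

-- ===== LEMMAS AND PROOFS =====

-- the m-th layer of A's table (substrings of length m+1 with their end indices)
def layerAt (cs : List Char) (m : Nat) : List (List Char × Nat) :=
  (List.range (cs.length - m)).map (fun i => ((cs.drop i).take (m + 1), i + m))

theorem layer0_eq (cs : List Char) :
    (List.range cs.length).map (fun i => ([cs.getD i ' '], i)) = layerAt cs 0 := by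
  unfold layerAt
  simp only [Nat.sub_zero, Nat.add_zero]
  apply List.map_congr_left
  intro i hi
  rw [List.mem_range] at hi
  simp [List.take_one, List.getD, List.getElem?_eq_getElem (by omega : i < cs.length)]

theorem take_snoc (cs : List Char) (i m : Nat) (h : i + m + 1 < cs.length) :
    (cs.drop i).take (m + 1) ++ [cs.getD (i + m + 1) ' '] = (cs.drop i).take (m + 2) := by
  have hlt : m + 1 < (cs.drop i).length := by simp [List.length_drop]; omega
  conv_rhs => rw [show m + 2 = (m + 1) + 1 from rfl, List.take_add_one, List.getElem?_eq_getElem hlt]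
  simp [List.getElem_drop, List.getD, List.getElem?_eq_getElem h,
    show i + (m + 1) = i + m + 1 by omega]

theorem filterMap_eq_map_of {α β : Type} (l : List α) (f : α → Option β) (g : α → β)
    (h : ∀ a ∈ l, f a = some (g a)) : l.filterMap f = l.map g := by
  induction l with
  | nil => rfl
  | cons a l ih =>
    simp [h a (List.mem_cons_self), ih (fun b hb => h b (List.mem_cons_of_mem _ hb))]

theorem step_eq (cs : List Char) (m : Nat) :
    (layerAt cs m).filterMap (fun p =>
      if p.2 + 1 < cs.length then some (p.1 ++ [cs.getD (p.2 + 1) ' '], p.2 + 1) else none)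
    = layerAt cs (m + 1) := by
  unfold layerAt
  rw [List.filterMap_map]
  rcases Nat.eq_zero_or_pos (cs.length - m) with h0 | h0
  · rw [h0, show cs.length - (m + 1) = 0 by omega]; rfl
  · obtain ⟨k, hk⟩ : ∃ k, cs.length - m = k + 1 := ⟨cs.length - m - 1, by omega⟩
    rw [hk, show cs.length - (m + 1) = k by omega, List.range_succ, List.filterMap_append]
    have hlast : k + m + 1 = cs.length := by omega
    rw [filterMap_eq_map_of (List.range k) _
      (fun i => ((cs.drop i).take (m + 1 + 1), i + (m + 1)))
      (by
        intro i hi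
        rw [List.mem_range] at hi
        have hlt : i + m + 1 < cs.length := by omega
        simp only [Function.comp]
        rw [if_pos (by omega : i + m + 1 < cs.length)]
        rw [take_snoc cs i m hlt]
        simp [show i + m + 1 = i + (m + 1) by omega])]
    simp [if_neg (by omega : ¬ (k + m + 1 < cs.length))]

theorem head_layerAt (cs : List Char) (m : Nat) (h : m < cs.length) :
    ((layerAt cs m).headD ([], 0)).1.length = m + 1 := by
  obtain ⟨k, hk⟩ : ∃ k, cs.length - m = k + 1 := ⟨cs.length - m - 1, by omega⟩
  unfold layerAt
  rw [hk, List.range_succ_eq_map]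
  simp
  omega

theorem layers_eq (cs : List Char) (fuel : Nat) : ∀ m, m < cs.length → cs.length - 1 - m ≤ fuel →
    getAllSubstringsLayers cs fuel (layerAt cs m)
      = (List.range' m (cs.length - m)).map (layerAt cs) := by
  induction fuel with
  | zero =>
    intro m hm hf
    have : cs.length - m = 1 := by omega
    rw [this]
    simp [getAllSubstringsLayers]
  | succ fuel ih =>
    intro m hm hf
    rw [getAllSubstringsLayers, head_layerAt cs m hm]
    by_cases hlt : m + 1 < cs.length
    · rw [if_pos hlt, step_eq, ih (m + 1) hlt (by omega)]
      obtain ⟨k, hk⟩ : ∃ k, cs.length - m = k + 1 := ⟨cs.length - m - 1, by omega⟩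
      rw [hk, show cs.length - (m + 1) = k by omega, List.range'_succ]
      rfl
    · rw [if_neg hlt]
      rw [show cs.length - m = 1 by omega]
      rfl

theorem get_all_substrings_spec : Claim_equal_get_all_substrings := by
  intro string _
  unfold Spec_get_all_substrings
  simp only [get_all_substrings, get_all_substrings_alt]
  by_cases h0 : string.toList.length = 0
  · simp [h0]
  · rw [if_neg h0, layer0_eq, layers_eq string.toList string.toList.length 0 (by omega) (by omega)]
    rw [Nat.sub_zero, ← List.range_eq_range']
    simp [layerAt, List.flatMap_map, List.map_flatMap, List.map_map, Function.comp_def]
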